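-- pv_equiv track=rewrite | github.com/Rudiakru/hton_project | backend/engines/spatial_analyzer.py | detect_teamfight
-- ===== SOURCE A (Python) =====
-- import math
--
-- TF_PLAYER_DISTANCE = 2000
--
-- TF_MIN_PLAYERS_PER_TEAM = 3
--
-- def get_distance(p1, p2):
--     """Berechnet die euklidische Distanz."""
--     return math.sqrt((p2['x'] - p1['x'])**2 + (p2['y'] - p1['y'])**2)
--
-- def detect_teamfight(all_players_by_team):
--     """
--     Erkennt einen Teamfight basierend auf der Proximity der Spieler.
--     """
--     if len(all_players_by_team) < 2:
--         return False
--
--     blue_team = all_players_by_team[0]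
--     red_team = all_players_by_team[1]
--
--     blue_near_red = 0
--     for b in blue_team:
--         for r in red_team:
--             if get_distance(b, r) < TF_PLAYER_DISTANCE:
--                 blue_near_red += 1
--                 break
--
--     red_near_blue = 0
--     for r in red_team:
--         for b in blue_team:
--             if get_distance(r, b) < TF_PLAYER_DISTANCE:
--                 red_near_blue += 1
--                 break
--
--     return blue_near_red >= TF_MIN_PLAYERS_PER_TEAM and red_near_blue >= TF_MIN_PLAYERS_PER_TEAM
-- ===== SOURCE B (Python) =====
-- TF_PLAYER_DISTANCE = 2000
-- TF_MIN_PLAYERS_PER_TEAM = 3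
--
-- def detect_teamfight(all_players_by_team):
--     """Single combined pass: collect the index sets of close cross-team players."""
--     if len(all_players_by_team) < 2:
--         return False
--     blue = all_players_by_team[0]
--     red = all_players_by_team[1]
--     limit = TF_PLAYER_DISTANCE * TF_PLAYER_DISTANCE
--     blue_close = set()
--     red_close = set()
--     for i, b in enumerate(blue):
--         for j, r in enumerate(red):
--             dx = r['x'] - b['x']
--             dy = r['y'] - b['y']
--             if dx * dx + dy * dy < limit:
--                 blue_close.add(i)
--                 red_close.add(j)
--     return len(blue_close) >= TF_MIN_PLAYERS_PER_TEAM and len(red_close) >= TF_MIN_PLAYERS_PER_TEAM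
-- ===== Notes on version B (the rewrite author's own statement) =====
-- stated objective: alternative
-- what changed: Replaces A's two separate scan-until-found passes (one per team, with an early break) by a single combined nested pass over all blue-red pairs that accumulates two index sets of close players and compares their sizes, testing squared distance against 2000^2 instead of calling math.sqrt.
import Mathlib
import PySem

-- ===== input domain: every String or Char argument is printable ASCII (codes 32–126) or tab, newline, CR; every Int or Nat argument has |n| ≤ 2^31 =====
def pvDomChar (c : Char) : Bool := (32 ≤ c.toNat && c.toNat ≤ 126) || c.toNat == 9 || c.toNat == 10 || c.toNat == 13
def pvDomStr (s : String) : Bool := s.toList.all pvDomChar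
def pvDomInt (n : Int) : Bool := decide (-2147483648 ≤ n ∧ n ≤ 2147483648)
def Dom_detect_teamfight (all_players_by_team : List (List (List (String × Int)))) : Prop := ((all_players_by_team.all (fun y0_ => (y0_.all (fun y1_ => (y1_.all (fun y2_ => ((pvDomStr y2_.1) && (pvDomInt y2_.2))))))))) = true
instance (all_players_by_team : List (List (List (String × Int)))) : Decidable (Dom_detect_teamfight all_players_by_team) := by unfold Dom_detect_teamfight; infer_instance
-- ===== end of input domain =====

-- B replaces A's two scan-until-found passes by one combined nested pass that collects the two
-- index sets of close cross-team players (objective: alternative decomposition, same cost).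

-- ===== PORT A =====
-- p['x'] / p['y'] on the dict-as-association-list: first match; KeyError (lookup = none) is excluded by Pre_detect_teamfight,
-- so the total getD form is exact there.
def pvKey (p : List (String × Int)) (k : String) : Int := (List.lookup k p).getD 0

-- A's get_distance returns math.sqrt(dx**2 + dy**2) (a float) and is used only in 'get_distance(...) < 2000'.
-- Ported by hand as the squared distance compared with 2000**2: exact for integer coordinates, because sqrt is
-- monotone and correctly rounded and no integer square distance other than 4000000 itself has a sqrt within one
-- ulp of 2000 (the neighbouring integers are ≈ 0.00025 away in sqrt; an ulp at 2000 is ≈ 2.3e-13).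
def get_distance_sq (p1 p2 : List (String × Int)) : Int :=
  (pvKey p2 "x" - pvKey p1 "x") ^ 2 + (pvKey p2 "y" - pvKey p1 "y") ^ 2

def detect_teamfight (all_players_by_team : List (List (List (String × Int)))) : Bool :=
  if all_players_by_team.length < 2 then false
  else
    let blue_team := PySem.List.pyGetD all_players_by_team 0 []
    let red_team := PySem.List.pyGetD all_players_by_team 1 []
    -- 'for b …: for r …: if close: count += 1; break' — the inner scan-until-found is List.any
    let blue_near_red : Int :=
      blue_team.foldl (fun acc b => if red_team.any (fun r => decide (get_distance_sq b r < 2000 ^ 2)) then acc + 1 else acc) 0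
    let red_near_blue : Int :=
      red_team.foldl (fun acc r => if blue_team.any (fun b => decide (get_distance_sq r b < 2000 ^ 2)) then acc + 1 else acc) 0
    decide (blue_near_red ≥ 3) && decide (red_near_blue ≥ 3)

-- ===== PORT B =====
def detect_teamfight_alt (all_players_by_team : List (List (List (String × Int)))) : Bool :=
  if all_players_by_team.length < 2 then false
  else
    let blue := PySem.List.pyGetD all_players_by_team 0 []
    let red := PySem.List.pyGetD all_players_by_team 1 []
    let limit : Int := 2000 * 2000
    let final :=
      (PySem.List.enumerate blue 0).foldl
        (fun (st : PySem.Set Int × PySem.Set Int) ib =>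
          (PySem.List.enumerate red 0).foldl
            (fun st2 jr =>
              if (pvKey jr.2 "x" - pvKey ib.2 "x") * (pvKey jr.2 "x" - pvKey ib.2 "x")
                   + (pvKey jr.2 "y" - pvKey ib.2 "y") * (pvKey jr.2 "y" - pvKey ib.2 "y") < limit
              then (PySem.Set.add st2.1 ib.1, PySem.Set.add st2.2 jr.1) else st2)
            st)
        (PySem.Set.empty, PySem.Set.empty)
    decide (PySem.Set.len final.1 ≥ 3) && decide (PySem.Set.len final.2 ≥ 3)

-- ===== PRECONDITION & SPEC =====
def pvHasXY (p : List (String × Int)) : Prop :=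
  (List.lookup "x" p).isSome = true ∧ (List.lookup "y" p).isSome = true

-- A raises KeyError exactly when it has two teams, both team 0 and team 1 are nonempty, and some player of
-- those two teams lacks an "x" or "y" key; exactly those inputs are excluded.
def Pre_detect_teamfight (all_players_by_team : List (List (List (String × Int)))) : Prop :=
  all_players_by_team.length < 2 ∨
  all_players_by_team.getD 0 [] = [] ∨ all_players_by_team.getD 1 [] = [] ∨
  ((∀ p ∈ all_players_by_team.getD 0 [], pvHasXY p) ∧ (∀ p ∈ all_players_by_team.getD 1 [], pvHasXY p))

instance (all_players_by_team : List (List (List (String × Int)))) : Decidable (Pre_detect_teamfight all_players_by_team) := by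
  unfold Pre_detect_teamfight pvHasXY; infer_instance

def pvWitness_detect_teamfight : (List (List (List (String × Int)))) :=
  [[[("x", 0), ("y", 0)]], [[("x", 1), ("y", 1)]]]

def Spec_detect_teamfight (all_players_by_team : List (List (List (String × Int)))) (out : Bool) : Prop := out = detect_teamfight_alt all_players_by_team
instance (all_players_by_team : List (List (List (String × Int)))) (out : Bool) : Decidable (Spec_detect_teamfight all_players_by_team out) := by unfold Spec_detect_teamfight; infer_instance

-- ===== CLAIM (what is proved, stated in full; the proofs are below) =====
def Claim_equal_detect_teamfight : Prop := ∀ (all_players_by_team : List (List (List (String × Int)))), Dom_detect_teamfight all_players_by_team → Pre_detect_teamfight all_players_by_team → Spec_detect_teamfight all_players_by_team (detect_teamfight all_players_by_team)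

-- ===== LEMMAS AND PROOFS =====

-- B's one inner step 'if close: add to both sets' acts componentwise on the pair of sets
theorem pv_pair_split {δ : Type} (m : List δ) (p : δ → Prop) [DecidablePred p] (f g : δ → Int)
    (st : PySem.Set Int × PySem.Set Int) :
    m.foldl (fun st2 b => if p b then (PySem.Set.add st2.1 (f b), PySem.Set.add st2.2 (g b)) else st2) st
      = (m.foldl (fun s b => if p b then PySem.Set.add s (f b) else s) st.1,
         m.foldl (fun s b => if p b then PySem.Set.add s (g b) else s) st.2) := by
  induction m generalizing st with
  | nil => rfl
  | cons b m ih =>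
    simp only [List.foldl_cons]
    by_cases h : p b
    · rw [if_pos h, if_pos h, if_pos h, ih]
    · rw [if_neg h, if_neg h, if_neg h, ih]

theorem pv_nested_split {γ δ : Type} (l : List γ) (m : List δ) (p : γ → δ → Prop)
    [∀ a b, Decidable (p a b)] (f g : γ → δ → Int) (st : PySem.Set Int × PySem.Set Int) :
    l.foldl (fun st a =>
        m.foldl (fun st2 b =>
          if p a b then (PySem.Set.add st2.1 (f a b), PySem.Set.add st2.2 (g a b)) else st2) st) st
      = (l.foldl (fun s a => m.foldl (fun s b => if p a b then PySem.Set.add s (f a b) else s) s) st.1,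
         l.foldl (fun s a => m.foldl (fun s b => if p a b then PySem.Set.add s (g a b) else s) s) st.2) := by
  obtain ⟨s1, s2⟩ := st
  simp only [pv_pair_split]
  exact PySem.List.foldl_prod_mk
    (f := fun s a => List.foldl (fun s b => if p a b then PySem.Set.add s (f a b) else s) s m)
    (g := fun s a => List.foldl (fun s b => if p a b then PySem.Set.add s (g a b) else s) s m) l s1 s2

-- membership in a conditional-add fold
theorem pv_condAdd_mem {δ : Type} (m : List δ) (p : δ → Prop) [DecidablePred p] (f : δ → Int)
    (s : PySem.Set Int) (x : Int) :
    x ∈ m.foldl (fun s b => if p b then PySem.Set.add s (f b) else s) s ↔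
      x ∈ s ∨ ∃ b ∈ m, p b ∧ x = f b := by
  induction m generalizing s with
  | nil => simp
  | cons b m ih =>
    rw [List.foldl_cons]
    by_cases h : p b
    · rw [if_pos h, ih]
      constructor
      · rintro (h1 | ⟨c, hc, hpc, rfl⟩)
        · rcases (PySem.Set.mem_add s (f b) x).mp h1 with hx | rfl
          · exact Or.inl hx
          · exact Or.inr ⟨b, List.mem_cons_self, h, rfl⟩
        · exact Or.inr ⟨c, List.mem_cons_of_mem b hc, hpc, rfl⟩
      · rintro (hx | ⟨c, hc, hpc, rfl⟩)
        · exact Or.inl ((PySem.Set.mem_add s (f b) x).mpr (Or.inl hx))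
        · rcases List.mem_cons.mp hc with rfl | hc
          · exact Or.inl ((PySem.Set.mem_add s (f c) (f c)).mpr (Or.inr rfl))
          · exact Or.inr ⟨c, hc, hpc, rfl⟩
    · rw [if_neg h, ih]
      constructor
      · rintro (hx | ⟨c, hc, hpc, rfl⟩)
        · exact Or.inl hx
        · exact Or.inr ⟨c, List.mem_cons_of_mem b hc, hpc, rfl⟩
      · rintro (hx | ⟨c, hc, hpc, rfl⟩)
        · exact Or.inl hx
        · rcases List.mem_cons.mp hc with rfl | hc
          · exact absurd hpc h
          · exact Or.inr ⟨c, hc, hpc, rfl⟩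

theorem pv_condAdd_nodup {δ : Type} (m : List δ) (p : δ → Prop) [DecidablePred p] (f : δ → Int)
    (s : PySem.Set Int) (hs : s.Nodup) :
    (m.foldl (fun s b => if p b then PySem.Set.add s (f b) else s) s).Nodup := by
  induction m generalizing s with
  | nil => exact hs
  | cons b m ih =>
    rw [List.foldl_cons]
    by_cases h : p b
    · rw [if_pos h]
      exact ih _ (PySem.Set.nodup_add s (f b) hs)
    · rw [if_neg h]
      exact ih _ hs

theorem pv_nested_mem {γ δ : Type} (l : List γ) (m : List δ) (p : γ → δ → Prop)
    [∀ a b, Decidable (p a b)] (f : γ → δ → Int) (s : PySem.Set Int) (x : Int) :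
    x ∈ l.foldl (fun s a => m.foldl (fun s b => if p a b then PySem.Set.add s (f a b) else s) s) s ↔
      x ∈ s ∨ ∃ a ∈ l, ∃ b ∈ m, p a b ∧ x = f a b := by
  induction l generalizing s with
  | nil => simp
  | cons a l ih =>
    rw [List.foldl_cons, ih]
    constructor
    · rintro (h1 | ⟨a', ha', b, hb, hp, rfl⟩)
      · rcases (pv_condAdd_mem m (p a) (f a) s x).mp h1 with hx | ⟨b, hb, hpb, rfl⟩
        · exact Or.inl hx
        · exact Or.inr ⟨a, List.mem_cons_self, b, hb, hpb, rfl⟩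
      · exact Or.inr ⟨a', List.mem_cons_of_mem a ha', b, hb, hp, rfl⟩
    · rintro (hx | ⟨a', ha', b, hb, hp, rfl⟩)
      · exact Or.inl ((pv_condAdd_mem m (p a) (f a) s x).mpr (Or.inl hx))
      · rcases List.mem_cons.mp ha' with rfl | ha'
        · exact Or.inl ((pv_condAdd_mem m (p a') (f a') s _).mpr (Or.inr ⟨b, hb, hp, rfl⟩))
        · exact Or.inr ⟨a', ha', b, hb, hp, rfl⟩

theorem pv_nested_nodup {γ δ : Type} (l : List γ) (m : List δ) (p : γ → δ → Prop)
    [∀ a b, Decidable (p a b)] (f : γ → δ → Int) (s : PySem.Set Int) (hs : s.Nodup) :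
    (l.foldl (fun s a => m.foldl (fun s b => if p a b then PySem.Set.add s (f a b) else s) s) s).Nodup := by
  induction l generalizing s with
  | nil => exact hs
  | cons a l ih => exact ih _ (pv_condAdd_nodup _ _ _ _ hs)

-- the length of a nested conditional-add fold equals the length of any Nodup list with the same members
theorem pv_len_nested {γ δ : Type} (l : List γ) (m : List δ) (p : γ → δ → Prop)
    [∀ a b, Decidable (p a b)] (f : γ → δ → Int) (L : List Int) (hL : L.Nodup)
    (hmem : ∀ x, x ∈ L ↔ ∃ a ∈ l, ∃ b ∈ m, p a b ∧ x = f a b) :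
    (l.foldl (fun s a => m.foldl (fun s b => if p a b then PySem.Set.add s (f a b) else s) s)
        (PySem.Set.empty : PySem.Set Int)).length = L.length := by
  apply List.Perm.length_eq
  rw [List.perm_ext_iff_of_nodup (pv_nested_nodup l m p f _ (by simp [PySem.Set.empty])) hL]
  intro x
  rw [pv_nested_mem, hmem]
  simp [PySem.Set.empty]

-- the first components of a filtered enumeration are distinct
theorem pv_filter_enum_nodup {α : Type} (xs : List α) (s : Int) (q : Int × α → Bool) :
    (((PySem.List.enumerate xs s).filter q).map (fun p => p.1)).Nodup := by
  have h1 : (List.filter q (PySem.List.enumerate xs s)).Pairwise (fun p q => p.1 < q.1) :=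
    (PySem.List.pairwise_lt_enumerate xs s).filter q
  have h2 : ((List.filter q (PySem.List.enumerate xs s)).map (fun p => p.1)).Pairwise (· < ·) :=
    List.pairwise_map.mpr h1
  exact h2.imp (fun h => ne_of_lt h)

theorem pv_countP_enum {α : Type} (xs : List α) (s : Int) (q : α → Bool) :
    (PySem.List.enumerate xs s).countP (fun ib => q ib.2) = xs.countP q := by
  conv_rhs => rw [← PySem.List.map_snd_enumerate xs s]
  rw [List.countP_map]
  rfl

-- the squared-distance test of B equals A's, in either argument order
theorem pv_close_eq (b r : List (String × Int)) :
    (get_distance_sq b r < 2000 ^ 2)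
      = ((pvKey r "x" - pvKey b "x") * (pvKey r "x" - pvKey b "x")
          + (pvKey r "y" - pvKey b "y") * (pvKey r "y" - pvKey b "y") < 2000 * 2000) := by
  have h1 : get_distance_sq b r
      = (pvKey r "x" - pvKey b "x") * (pvKey r "x" - pvKey b "x")
          + (pvKey r "y" - pvKey b "y") * (pvKey r "y" - pvKey b "y") := by
    unfold get_distance_sq; ring
  rw [h1]; norm_num

theorem pv_close_eq' (r b : List (String × Int)) :
    (get_distance_sq r b < 2000 ^ 2)
      = ((pvKey r "x" - pvKey b "x") * (pvKey r "x" - pvKey b "x")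
          + (pvKey r "y" - pvKey b "y") * (pvKey r "y" - pvKey b "y") < 2000 * 2000) := by
  have h1 : get_distance_sq r b
      = (pvKey r "x" - pvKey b "x") * (pvKey r "x" - pvKey b "x")
          + (pvKey r "y" - pvKey b "y") * (pvKey r "y" - pvKey b "y") := by
    unfold get_distance_sq; ring
  rw [h1]; norm_num

theorem pv_length_filter_enum {α : Type} (xs : List α) (s : Int) (q : α → Bool) :
    ((PySem.List.enumerate xs s).filter (fun ib => q ib.2)).length = xs.countP q := by
  rw [← List.countP_eq_length_filter]
  exact pv_countP_enum xs s q

theorem pv_exists_enum {α : Type} (xs : List α) (P : α → Prop) :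
    (∃ jr ∈ PySem.List.enumerate xs 0, P jr.2) ↔ ∃ r ∈ xs, P r := by
  constructor
  · rintro ⟨jr, hjr, hP⟩
    rcases (PySem.List.mem_enumerate_iff xs 0 jr).mp hjr with ⟨k, hk, rfl⟩
    exact ⟨xs[k], List.getElem_mem hk, hP⟩
  · rintro ⟨r, hr, hP⟩
    rcases List.mem_iff_getElem.mp hr with ⟨k, hk, rfl⟩
    exact ⟨((0 : Int) + k, xs[k]), (PySem.List.mem_enumerate_iff xs 0 _).mpr ⟨k, hk, rfl⟩, hP⟩

-- ===== VERDICT (by name: the statement is the Claim_ definition above) =====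
theorem detect_teamfight_spec : Claim_equal_detect_teamfight := by
  intro aps _ _
  unfold Spec_detect_teamfight detect_teamfight detect_teamfight_alt
  by_cases h : aps.length < 2
  · simp only [if_pos h]
  · simp only [if_neg h]
    set blue := PySem.List.pyGetD aps 0 [] with hblue
    set red := PySem.List.pyGetD aps 1 [] with hred
    set cl : (Int × List (String × Int)) → (Int × List (String × Int)) → Prop := fun ib jr =>
      (pvKey jr.2 "x" - pvKey ib.2 "x") * (pvKey jr.2 "x" - pvKey ib.2 "x")
        + (pvKey jr.2 "y" - pvKey ib.2 "y") * (pvKey jr.2 "y" - pvKey ib.2 "y") < 2000 * 2000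
      with hcl
    set qx : List (String × Int) → Bool := fun b => red.any (fun r => decide (cl (0, b) (0, r))) with hqx
    set qy : List (String × Int) → Bool := fun r => blue.any (fun b => decide (cl (0, b) (0, r))) with hqy
    rw [pv_nested_split (p := cl) (f := fun ib _ => ib.1) (g := fun _ jr => jr.1)]
    -- B side: both set lengths are countP's
    have hmem1 : ∀ x, x ∈ ((PySem.List.enumerate blue 0).filter (fun ib => qx ib.2)).map (fun p => p.1) ↔
        ∃ a ∈ PySem.List.enumerate blue 0, ∃ b ∈ PySem.List.enumerate red 0, cl a b ∧ x = a.1 := by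
      intro x
      simp only [List.mem_map, List.mem_filter, hqx, List.any_eq_true, decide_eq_true_eq]
      constructor
      · rintro ⟨a, ⟨ha, hq⟩, rfl⟩
        rcases (pv_exists_enum red (fun r => cl (0, a.2) (0, r))).mpr hq with ⟨jr, hjr, hP⟩
        exact ⟨a, ha, jr, hjr, hP, rfl⟩
      · rintro ⟨a, ha, jr, hjr, hP, rfl⟩
        exact ⟨a, ⟨ha, (pv_exists_enum red (fun r => cl (0, a.2) (0, r))).mp ⟨jr, hjr, hP⟩⟩, rfl⟩
    have hmem2 : ∀ x, x ∈ ((PySem.List.enumerate red 0).filter (fun jr => qy jr.2)).map (fun p => p.1) ↔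
        ∃ a ∈ PySem.List.enumerate blue 0, ∃ b ∈ PySem.List.enumerate red 0, cl a b ∧ x = b.1 := by
      intro x
      simp only [List.mem_map, List.mem_filter, hqy, List.any_eq_true, decide_eq_true_eq]
      constructor
      · rintro ⟨jr, ⟨hjr, hq⟩, rfl⟩
        rcases (pv_exists_enum blue (fun b => cl (0, b) (0, jr.2))).mpr hq with ⟨a, ha, hP⟩
        exact ⟨a, ha, jr, hjr, hP, rfl⟩
      · rintro ⟨a, ha, jr, hjr, hP, rfl⟩
        exact ⟨jr, ⟨hjr, (pv_exists_enum blue (fun b => cl (0, b) (0, jr.2))).mp ⟨a, ha, hP⟩⟩, rfl⟩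
    have hlen1 := pv_len_nested (PySem.List.enumerate blue 0) (PySem.List.enumerate red 0) cl
      (fun ib _ => ib.1) _ (pv_filter_enum_nodup blue 0 (fun ib => qx ib.2)) hmem1
    have hlen2 := pv_len_nested (PySem.List.enumerate blue 0) (PySem.List.enumerate red 0) cl
      (fun _ jr => jr.1) _ (pv_filter_enum_nodup red 0 (fun jr => qy jr.2)) hmem2
    rw [List.length_map, pv_length_filter_enum blue 0 qx] at hlen1
    rw [List.length_map, pv_length_filter_enum red 0 qy] at hlen2
    simp only [PySem.Set.len, hlen1, hlen2]
    -- A side: the two counting folds are countP's of the same predicates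
    rw [PySem.List.foldl_if_add_one (fun b => red.any fun r => decide (get_distance_sq b r < 2000 ^ 2)) blue 0,
        PySem.List.foldl_if_add_one (fun r => blue.any fun b => decide (get_distance_sq r b < 2000 ^ 2)) red 0]
    have hq1 : (fun b => red.any fun r => decide (get_distance_sq b r < 2000 ^ 2)) = qx := by
      funext b
      simp only [hqx, hcl]
      congr 1
      funext r
      congr 1
      exact pv_close_eq b r
    have hq2 : (fun r => blue.any fun b => decide (get_distance_sq r b < 2000 ^ 2)) = qy := by
      funext r
      simp only [hqy, hcl]
      congr 1
      funext b
      congr 1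
      exact pv_close_eq' r b
    rw [hq1, hq2]
    simp
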